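-- pv_equiv track=rewrite | github.com/whiteclips/interpretasi-dan-pengolahan-citra | script/operation.py | do_operation_difference
-- ===== SOURCE A (Python) =====
-- def get_difference_of_point_in_array(point_1_x, point_1_y, point_2_x, point_2_y, array):
--     width = len(array)
--     height = len(array[0])
--     if (point_1_x < 0 or point_1_x >= width or point_1_y < 0 or point_1_y >= height):
--         point_1 = 0
--     else:
--         point_1 = array[point_1_x][point_1_y]
--     if (point_2_x < 0 or point_2_x >= width or point_2_y < 0 or point_2_y >= height):
--         point_2 = 0
--     else:
--         point_2 = array[point_2_x][point_2_y]
--     return abs(point_1 - point_2)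
--
-- def do_operation_difference(array):
--     width = len(array)
--     height = len(array[0])
--     # for j in range(10):
--     #     line = ""
--     #     for i in range(10):
--     #         line = line + str(array[i][j]) + " "
--     #     print line
--     # print "-----"
--     result_array = [[None for y in range(height) ] for x in range(width)]
--     for i in range(width):
--         for j in range(height):
--             difference_1 = get_difference_of_point_in_array(i, j, i - 1, j - 1, array)
--             difference_2 = get_difference_of_point_in_array(i, j, i, j - 1, array)
--             difference_3 = get_difference_of_point_in_array(i, j, i + 1, j - 1, array)
--             difference_4 = get_difference_of_point_in_array(i, j, i + 1, j, array)
--             difference_5 = get_difference_of_point_in_array(i, j, i + 1, j + 1, array)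
--             difference_6 = get_difference_of_point_in_array(i, j, i, j + 1, array)
--             difference_7 = get_difference_of_point_in_array(i, j, i - 1, j + 1, array)
--             difference_8 = get_difference_of_point_in_array(i, j, i - 1, j, array)
--             result_array[i][j] = max(difference_1, difference_2, difference_3, difference_4, difference_5, difference_6, difference_7, difference_8)
--     # for j in range(10):
--     #     line = ""
--     #     for i in range(10):
--     #         line = line + str(result_array[i][j]) + " "
--     #     print line
--     return result_array
-- ===== SOURCE B (Python) =====
-- def do_operation_difference(array):
--     width = len(array)
--     height = len(array[0])
--     # Stage 1: zero-padded copy of the image, (width+2) x (height+2).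
--     padded = [[0] * (height + 2)]
--     for row in array:
--         padded.append([0] + list(row[:height]) + [0])
--     padded.append([0] * (height + 2))
--     # Stage 2: separable 3-wide min/max filters -- first horizontally ...
--     row_min = [[min(r[j], r[j + 1], r[j + 2]) for j in range(height)] for r in padded]
--     row_max = [[max(r[j], r[j + 1], r[j + 2]) for j in range(height)] for r in padded]
--     # ... then vertically, giving the 3x3-window (center included) min/max.
--     # Including the center is harmless: max_k |c - n_k| over the 8 neighbors
--     # equals max(c - min9, max9 - c) because that value is always >= 0.
--     result_array = [[None for y in range(height)] for x in range(width)]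
--     for i in range(width):
--         for j in range(height):
--             c = array[i][j]
--             lo = min(row_min[i][j], row_min[i + 1][j], row_min[i + 2][j])
--             hi = max(row_max[i][j], row_max[i + 1][j], row_max[i + 2][j])
--             result_array[i][j] = max(c - lo, hi - c)
--     return result_array
-- ===== Notes on version B (the rewrite author's own statement) =====
-- stated objective: faster
-- what changed: Replaces the per-pixel eight bounds-checked abs-difference helper calls by a staged pipeline: build an explicitly zero-padded (w+2)x(h+2) copy, run a separable 3-wide horizontal then vertical min/max filter over it (center included, which is harmless since the answer is nonnegative), and emit max(c-min9, max9-c) per pixel.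
import Mathlib
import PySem

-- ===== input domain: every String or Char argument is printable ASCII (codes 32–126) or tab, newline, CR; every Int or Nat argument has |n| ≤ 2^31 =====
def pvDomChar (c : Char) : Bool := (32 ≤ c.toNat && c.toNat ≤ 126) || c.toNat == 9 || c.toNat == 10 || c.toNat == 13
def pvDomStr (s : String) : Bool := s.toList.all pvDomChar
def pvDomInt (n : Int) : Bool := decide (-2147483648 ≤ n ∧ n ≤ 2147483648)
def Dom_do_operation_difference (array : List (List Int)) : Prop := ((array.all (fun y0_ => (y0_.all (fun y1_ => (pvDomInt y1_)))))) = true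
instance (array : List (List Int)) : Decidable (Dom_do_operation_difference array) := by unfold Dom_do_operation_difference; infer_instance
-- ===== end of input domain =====

-- B replaces A's eight bounds-checked abs-difference helper calls by a staged pipeline: an explicit
-- zero-padded copy, separable horizontal-then-vertical 3-wide min/max filters, and max(c-lo, hi-c);
-- objective: faster by a constant factor (no per-pixel helper calls or bounds checks), same asymptotics.


-- ===== PORT A =====
def get_difference_of_point_in_array (point_1_x point_1_y point_2_x point_2_y : Int)
    (array : List (List Int)) : Int :=
  let width : Int := array.length
  let height : Int := ((PySem.List.pyGet? array 0).getD []).length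
  let point_1 : Int :=
    if point_1_x < 0 ∨ point_1_x ≥ width ∨ point_1_y < 0 ∨ point_1_y ≥ height then 0
    else PySem.List.pyGetD (PySem.List.pyGetD array point_1_x []) point_1_y 0
  let point_2 : Int :=
    if point_2_x < 0 ∨ point_2_x ≥ width ∨ point_2_y < 0 ∨ point_2_y ≥ height then 0
    else PySem.List.pyGetD (PySem.List.pyGetD array point_2_x []) point_2_y 0
  |point_1 - point_2|

def do_operation_difference (array : List (List Int)) : List (List Int) :=
  let width : Int := array.length
  let height : Int := ((PySem.List.pyGet? array 0).getD []).length
  (PySem.List.pyRange 0 width 1).map (fun i =>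
    (PySem.List.pyRange 0 height 1).map (fun j =>
      let difference_1 := get_difference_of_point_in_array i j (i - 1) (j - 1) array
      let difference_2 := get_difference_of_point_in_array i j i (j - 1) array
      let difference_3 := get_difference_of_point_in_array i j (i + 1) (j - 1) array
      let difference_4 := get_difference_of_point_in_array i j (i + 1) j array
      let difference_5 := get_difference_of_point_in_array i j (i + 1) (j + 1) array
      let difference_6 := get_difference_of_point_in_array i j i (j + 1) array
      let difference_7 := get_difference_of_point_in_array i j (i - 1) (j + 1) array
      let difference_8 := get_difference_of_point_in_array i j (i - 1) j array
      max (max (max (max (max (max (max difference_1 difference_2) difference_3)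
        difference_4) difference_5) difference_6) difference_7) difference_8))

-- ===== PORT B =====  (transliteration of Source B: padded copy, then two separable filter passes)
def do_operation_difference_alt (array : List (List Int)) : List (List Int) :=
  let width : Int := array.length
  let height : Int := ((PySem.List.pyGet? array 0).getD []).length
  let padded : List (List Int) :=
    ([List.replicate (height + 2).toNat (0 : Int)] ++
      array.map (fun row => [(0 : Int)] ++ PySem.List.slice row none (some height) ++ [0])) ++
    [List.replicate (height + 2).toNat (0 : Int)]
  let row_min : List (List Int) := padded.map (fun r =>
    (PySem.List.pyRange 0 height 1).map (fun j =>
      min (min (PySem.List.pyGetD r j 0) (PySem.List.pyGetD r (j + 1) 0)) (PySem.List.pyGetD r (j + 2) 0)))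
  let row_max : List (List Int) := padded.map (fun r =>
    (PySem.List.pyRange 0 height 1).map (fun j =>
      max (max (PySem.List.pyGetD r j 0) (PySem.List.pyGetD r (j + 1) 0)) (PySem.List.pyGetD r (j + 2) 0)))
  (PySem.List.pyRange 0 width 1).map (fun i =>
    (PySem.List.pyRange 0 height 1).map (fun j =>
      let c := PySem.List.pyGetD (PySem.List.pyGetD array i []) j 0
      let lo := min (min (PySem.List.pyGetD (PySem.List.pyGetD row_min i []) j 0)
                         (PySem.List.pyGetD (PySem.List.pyGetD row_min (i + 1) []) j 0))
                    (PySem.List.pyGetD (PySem.List.pyGetD row_min (i + 2) []) j 0)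
      let hi := max (max (PySem.List.pyGetD (PySem.List.pyGetD row_max i []) j 0)
                         (PySem.List.pyGetD (PySem.List.pyGetD row_max (i + 1) []) j 0))
                    (PySem.List.pyGetD (PySem.List.pyGetD row_max (i + 2) []) j 0)
      max (c - lo) (hi - c)))

-- ===== PRECONDITION & SPEC =====
-- Pre_ excludes exactly the inputs where Python A raises IndexError: the empty array (len(array[0]))
-- and ragged arrays where some row is shorter than the first row (array[i][j] for j < len(array[0])).
def Pre_do_operation_difference (array : List (List Int)) : Prop :=
  array ≠ [] ∧ ∀ row ∈ array, (array.headD []).length ≤ row.length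
instance (array : List (List Int)) : Decidable (Pre_do_operation_difference array) := by
  unfold Pre_do_operation_difference; infer_instance
def pvWitness_do_operation_difference : List (List Int) := [[1, 2], [3, 4]]

def Spec_do_operation_difference (array : List (List Int)) (out : List (List Int)) : Prop := out = do_operation_difference_alt array
instance (array : List (List Int)) (out : List (List Int)) : Decidable (Spec_do_operation_difference array out) := by unfold Spec_do_operation_difference; infer_instance

-- ===== CLAIM (what is proved, stated in full; the proofs are below) =====
def Claim_equal_do_operation_difference : Prop := ∀ (array : List (List Int)), Dom_do_operation_difference array → Pre_do_operation_difference array → Spec_do_operation_difference array (do_operation_difference array)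

-- ===== LEMMAS AND PROOFS =====

-- guarded pixel access with 0 outside the w×h frame (proof-side abbreviation shared by both sides)
def pvVal (array : List (List Int)) (x y : Int) : Int :=
  if 0 ≤ x ∧ x < (array.length : Int) ∧ 0 ≤ y ∧ y < (((PySem.List.pyGet? array 0).getD []).length : Int)
  then PySem.List.pyGetD (PySem.List.pyGetD array x []) y 0 else 0

-- |a - b| as a two-sided max
lemma pv_abs (a b : Int) : |a - b| = max (a - b) (b - a) := by
  rw [abs_eq_max_neg, neg_sub]

-- A's guard is the negation of pvVal's guard
lemma pv_A_point (array : List (List Int)) (x y : Int) :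
    (if x < 0 ∨ x ≥ (array.length : Int) ∨ y < 0 ∨ y ≥ (((PySem.List.pyGet? array 0).getD []).length : Int)
      then 0 else PySem.List.pyGetD (PySem.List.pyGetD array x []) y 0) = pvVal array x y := by
  unfold pvVal
  split_ifs with h1 h2 h2 <;> first | rfl | (exfalso; omega)

-- the padded grid, named for proof reuse (syntactically the 'padded' of the B port)
def pvPadded (array : List (List Int)) : List (List Int) :=
  ([List.replicate ((((PySem.List.pyGet? array 0).getD []).length : Int) + 2).toNat (0 : Int)] ++
    array.map (fun row => [(0 : Int)] ++ PySem.List.slice row none (some (((PySem.List.pyGet? array 0).getD []).length : Int)) ++ [0])) ++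
  [List.replicate ((((PySem.List.pyGet? array 0).getD []).length : Int) + 2).toNat (0 : Int)]

-- the first row of a nonempty array is what len(array[0]) reads
lemma pv_h_eq (array : List (List Int)) (hne : array ≠ []) :
    ((PySem.List.pyGet? array 0).getD []).length = (array.headD []).length := by
  cases array with
  | nil => exact absurd rfl hne
  | cons a l => rw [PySem.List.pyGet?_zero_cons]; rfl

-- entry of the padded grid = guarded access shifted by one
lemma pv_padded_get (array : List (List Int)) (hPre : Pre_do_operation_difference array)
    (x y : Int) (hx : 0 ≤ x ∧ x < (array.length : Int) + 2) (hy : 0 ≤ y ∧ y < (((PySem.List.pyGet? array 0).getD []).length : Int) + 2) :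
    PySem.List.pyGetD (PySem.List.pyGetD (pvPadded array) x []) y 0 = pvVal array (x - 1) (y - 1) := by
  obtain ⟨hx0, hx2⟩ := hx
  obtain ⟨hy0, hy2⟩ := hy
  obtain ⟨n, rfl⟩ : ∃ n : Nat, x = (n : Int) := ⟨x.toNat, by omega⟩
  obtain ⟨m, rfl⟩ : ∃ m : Nat, y = (m : Int) := ⟨y.toNat, by omega⟩
  rw [PySem.List.pyGetD_natCast, PySem.List.pyGetD_natCast]
  have hslice : ∀ row : List Int,
      PySem.List.slice row none (some (((PySem.List.pyGet? array 0).getD []).length : Int))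
        = row.take ((PySem.List.pyGet? array 0).getD []).length := by
    intro row
    rw [PySem.List.slice_to row (by positivity)]
    simp
  have hpad : pvPadded array
      = List.replicate (((PySem.List.pyGet? array 0).getD []).length + 2) (0 : Int)
        :: (array.map (fun row => (0 : Int) :: (row.take ((PySem.List.pyGet? array 0).getD []).length ++ [0]))
            ++ [List.replicate (((PySem.List.pyGet? array 0).getD []).length + 2) (0 : Int)]) := by
    unfold pvPadded
    simp only [hslice]
    have : ((((PySem.List.pyGet? array 0).getD []).length : Int) + 2).toNat
        = ((PySem.List.pyGet? array 0).getD []).length + 2 := by omega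
    rw [this]
    simp
  rw [hpad]
  have hrep : ∀ k : Nat, (List.replicate k (0 : Int)).getD m 0 = 0 := by
    intro k
    rw [List.getD_eq_getElem?_getD, List.getElem?_replicate]
    split <;> rfl
  rcases Nat.eq_zero_or_pos n with hn0 | hnpos
  · -- top padding row
    subst hn0
    rw [List.getD_cons_zero, hrep]
    unfold pvVal
    rw [if_neg (by omega)]
  · obtain ⟨k, rfl⟩ : ∃ k, n = k + 1 := ⟨n - 1, by omega⟩
    rw [List.getD_cons_succ]
    by_cases hk : k < array.length
    · -- image row k
      have hrow : (List.map (fun row => (0 : Int) :: (row.take ((PySem.List.pyGet? array 0).getD []).length ++ [0])) array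
            ++ [List.replicate (((PySem.List.pyGet? array 0).getD []).length + 2) (0 : Int)]).getD k []
          = (0 : Int) :: (array[k].take ((PySem.List.pyGet? array 0).getD []).length ++ [0]) := by
        rw [List.getD_eq_getElem?_getD, List.getElem?_append_left (by simpa using hk),
            List.getElem?_map, List.getElem?_eq_getElem hk]
        rfl
      rw [hrow]
      have hrowlen : ((PySem.List.pyGet? array 0).getD []).length ≤ array[k].length := by
        rw [pv_h_eq array hPre.1]
        exact hPre.2 _ (array.getElem_mem hk)
      have htklen : (array[k].take ((PySem.List.pyGet? array 0).getD []).length).length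
          = ((PySem.List.pyGet? array 0).getD []).length := by
        simpa using hrowlen
      rcases Nat.eq_zero_or_pos m with hm0 | hmpos
      · subst hm0
        rw [List.getD_cons_zero]
        unfold pvVal
        rw [if_neg (by omega)]
      · obtain ⟨t, rfl⟩ : ∃ t, m = t + 1 := ⟨m - 1, by omega⟩
        rw [List.getD_cons_succ]
        by_cases ht : t < ((PySem.List.pyGet? array 0).getD []).length
        · -- interior pixel
          rw [List.getD_eq_getElem?_getD, List.getElem?_append_left (by omega),
              List.getElem?_take, if_pos ht, List.getElem?_eq_getElem (by omega),
              Option.getD_some]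
          unfold pvVal
          rw [if_pos ⟨by omega, by omega, by omega, by omega⟩]
          rw [show ((k + 1 : Nat) : Int) - 1 = (k : Int) by push_cast; ring,
              show ((t + 1 : Nat) : Int) - 1 = (t : Int) by push_cast; ring]
          rw [PySem.List.pyGetD_natCast, PySem.List.pyGetD_natCast,
              List.getD_eq_getElem?_getD, List.getD_eq_getElem?_getD,
              List.getElem?_eq_getElem hk, Option.getD_some,
              List.getElem?_eq_getElem (show t < array[k].length by omega), Option.getD_some]
        · -- right padding 0 of this row (t = h)
          rw [List.getD_eq_getElem?_getD,
              show t = (array[k].take ((PySem.List.pyGet? array 0).getD []).length).length by omega,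
              List.getElem?_concat_length, Option.getD_some]
          unfold pvVal
          rw [if_neg (by push_cast; omega)]
    · -- bottom padding row (k = array.length)
      have hrow : (List.map (fun row => (0 : Int) :: (row.take ((PySem.List.pyGet? array 0).getD []).length ++ [0])) array
            ++ [List.replicate (((PySem.List.pyGet? array 0).getD []).length + 2) (0 : Int)]).getD k []
          = List.replicate (((PySem.List.pyGet? array 0).getD []).length + 2) (0 : Int) := by
        rw [List.getD_eq_getElem?_getD,
            show k = (List.map (fun row => (0 : Int) :: (row.take ((PySem.List.pyGet? array 0).getD []).length ++ [0])) array).length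
              by simp; omega,
            List.getElem?_concat_length, Option.getD_some]
      rw [hrow, hrep]
      unfold pvVal
      rw [if_neg (by push_cast; omega)]

-- op-combination (op = min / max) of the three 3-window entries of padded row x around column j
lemma pv_row_get (op : Int → Int → Int) (array : List (List Int)) (hPre : Pre_do_operation_difference array)
    (x j : Int) (hx : 0 ≤ x ∧ x < (array.length : Int) + 2) (hj : 0 ≤ j ∧ j < (((PySem.List.pyGet? array 0).getD []).length : Int)) :
    PySem.List.pyGetD (PySem.List.pyGetD ((pvPadded array).map (fun r =>
      (PySem.List.pyRange 0 (((PySem.List.pyGet? array 0).getD []).length : Int) 1).map (fun j =>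
        op (op (PySem.List.pyGetD r j 0) (PySem.List.pyGetD r (j + 1) 0)) (PySem.List.pyGetD r (j + 2) 0)))) x []) j 0
    = op (op (pvVal array (x - 1) (j - 1)) (pvVal array (x - 1) j)) (pvVal array (x - 1) (j + 1)) := by
  obtain ⟨hx0, hx2⟩ := hx
  obtain ⟨hj0, hj2⟩ := hj
  obtain ⟨n, rfl⟩ : ∃ n : Nat, x = (n : Int) := ⟨x.toNat, by omega⟩
  have hlen : (pvPadded array).length = array.length + 2 := by
    unfold pvPadded; simp
  have hn : n < (pvPadded array).length := by rw [hlen]; omega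
  rw [PySem.List.pyGetD_natCast, List.getD_eq_getElem?_getD, List.getElem?_map,
      List.getElem?_eq_getElem hn, Option.map_some, Option.getD_some]
  rw [PySem.List.pyGetD_map_pyRange_of_nonneg _ _ _ _ hj0 hj2]
  have hback : (pvPadded array)[n] = PySem.List.pyGetD (pvPadded array) ((n : Nat) : Int) [] := by
    rw [PySem.List.pyGetD_natCast, List.getD_eq_getElem?_getD, List.getElem?_eq_getElem hn,
        Option.getD_some]
  rw [hback]
  rw [pv_padded_get array hPre ((n : Nat) : Int) j ⟨hx0, hx2⟩ ⟨by omega, by omega⟩,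
      pv_padded_get array hPre ((n : Nat) : Int) (j + 1) ⟨hx0, hx2⟩ ⟨by omega, by omega⟩,
      pv_padded_get array hPre ((n : Nat) : Int) (j + 2) ⟨hx0, hx2⟩ ⟨by omega, by omega⟩,
      show j + 1 - 1 = j from by ring, show j + 2 - 1 = j + 1 from by ring]

-- running max of two-sided differences = two-sided bound from running min and running max
lemma pv_gen (c : Int) (t : List Int) (a lo hi : Int) (h : a = max (c - lo) (hi - c)) :
    t.foldl (fun acc n => max acc (max (c - n) (n - c))) a
      = max (c - t.foldl min lo) (t.foldl max hi - c) := by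
  induction t generalizing a lo hi with
  | nil => simpa using h
  | cons y t ih =>
      simp only [List.foldl]
      apply ih
      subst h
      omega

-- the arithmetic core: the 8-neighbor abs-max equals the two-sided bound from the
-- center-included 3x3 min/max, grouped as B groups its three row windows
lemma pv_regroup_min (c n1 n2 n3 n4 n5 n6 n7 n8 : Int) :
    min (min (min (min n1 n8) n7) (min (min n2 c) n6)) (min (min n3 n4) n5)
      = min (min (min (min (min (min (min (min n1 n2) n3) n4) n5) n6) n7) n8) c := by ac_rfl

lemma pv_regroup_max (c n1 n2 n3 n4 n5 n6 n7 n8 : Int) :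
    max (max (max (max n1 n8) n7) (max (max n2 c) n6)) (max (max n3 n4) n5)
      = max (max (max (max (max (max (max (max n1 n2) n3) n4) n5) n6) n7) n8) c := by ac_rfl

-- including the center in the window is harmless once min ≤ max
lemma pv_center (c m M : Int) (h : m ≤ M) :
    max (c - min m c) (max M c - c) = max (c - m) (M - c) := by omega

-- the 8-neighbor abs-max as a two-sided bound from the 8-neighbor min and max
lemma pv_core (c n1 n2 n3 n4 n5 n6 n7 n8 : Int) :
    max (max (max (max (max (max (max |c - n1| |c - n2|) |c - n3|) |c - n4|) |c - n5|)
      |c - n6|) |c - n7|) |c - n8|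
    = max (c - min (min (min (min (min (min (min n1 n2) n3) n4) n5) n6) n7) n8)
        (max (max (max (max (max (max (max n1 n2) n3) n4) n5) n6) n7) n8 - c) := by
  simp only [pv_abs]
  have h8 := pv_gen c [n2, n3, n4, n5, n6, n7, n8] (max (c - n1) (n1 - c)) n1 n1 rfl
  simp only [List.foldl] at h8
  exact h8

-- the arithmetic core: the 8-neighbor abs-max equals the two-sided bound from the
-- center-included 3x3 min/max, grouped as B groups its three row windows
lemma pv_key (c n1 n2 n3 n4 n5 n6 n7 n8 : Int) :
    max (max (max (max (max (max (max |c - n1| |c - n2|) |c - n3|) |c - n4|) |c - n5|)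
      |c - n6|) |c - n7|) |c - n8|
    = max (c - min (min (min (min n1 n8) n7) (min (min n2 c) n6)) (min (min n3 n4) n5))
        (max (max (max (max n1 n8) n7) (max (max n2 c) n6)) (max (max n3 n4) n5) - c) := by
  rw [pv_regroup_min, pv_regroup_max,
      pv_center _ _ _ (le_trans (min_le_right _ _) (le_max_right _ _))]
  exact pv_core c n1 n2 n3 n4 n5 n6 n7 n8

-- ===== VERDICT (by name: the statement is the Claim_ definition above) =====
theorem do_operation_difference_spec : Claim_equal_do_operation_difference := by
  intro array _ hPre
  unfold Spec_do_operation_difference do_operation_difference do_operation_difference_alt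
  simp only []
  apply List.map_congr_left
  intro i hi
  apply List.map_congr_left
  intro j hj
  rw [PySem.List.mem_pyRange_one] at hi hj
  simp only [get_difference_of_point_in_array]
  rw [show (([List.replicate ((((PySem.List.pyGet? array 0).getD []).length : Int) + 2).toNat (0 : Int)] ++
      array.map (fun row => [(0 : Int)] ++ PySem.List.slice row none (some (((PySem.List.pyGet? array 0).getD []).length : Int)) ++ [0])) ++
    [List.replicate ((((PySem.List.pyGet? array 0).getD []).length : Int) + 2).toNat (0 : Int)]) = pvPadded array from rfl]
  rw [pv_row_get min array hPre i j ⟨by omega, by omega⟩ ⟨by omega, by omega⟩,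
      pv_row_get min array hPre (i + 1) j ⟨by omega, by omega⟩ ⟨by omega, by omega⟩,
      pv_row_get min array hPre (i + 2) j ⟨by omega, by omega⟩ ⟨by omega, by omega⟩,
      pv_row_get max array hPre i j ⟨by omega, by omega⟩ ⟨by omega, by omega⟩,
      pv_row_get max array hPre (i + 1) j ⟨by omega, by omega⟩ ⟨by omega, by omega⟩,
      pv_row_get max array hPre (i + 2) j ⟨by omega, by omega⟩ ⟨by omega, by omega⟩]
  rw [show i + 1 - 1 = i from by ring, show i + 2 - 1 = i + 1 from by ring]
  rw [if_neg (by omega)]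
  rw [pv_A_point, pv_A_point, pv_A_point, pv_A_point, pv_A_point, pv_A_point, pv_A_point, pv_A_point]
  rw [show PySem.List.pyGetD (PySem.List.pyGetD array i []) j 0 = pvVal array i j from by
        unfold pvVal; rw [if_pos ⟨by omega, by omega, by omega, by omega⟩]]
  exact pv_key (pvVal array i j) (pvVal array (i - 1) (j - 1)) (pvVal array i (j - 1))
    (pvVal array (i + 1) (j - 1)) (pvVal array (i + 1) j) (pvVal array (i + 1) (j + 1))
    (pvVal array i (j + 1)) (pvVal array (i - 1) (j + 1)) (pvVal array (i - 1) j)
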